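-- pv_equiv track=rewrite | github.com/iamywl/daeguS-W | process2/sol2-1/door_hack_test.py | generate_combinations
-- ===== SOURCE A (Python) =====
-- import itertools
--
-- def generate_combinations(charset, length, start_idx, end_idx):
--     """
--     주어진 문자셋과 길이로 가능한 조합을 특정 범위만큼 생성하는 제너레이터
--     """
--     counter = 0
--     for combination in itertools.product(charset, repeat=length):
--         if counter >= start_idx and counter < end_idx:
--             yield "".join(combination)
--         counter += 1
--         if counter >= end_idx:
--             break
-- ===== SOURCE B (Python) =====
-- def generate_combinations(charset, length, start_idx, end_idx):
--     """
--     Mixed-radix re-implementation: clamp the requested window to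
--     [max(start_idx,0), min(end_idx, n**length)) and decode each index in it
--     directly into its combination, instead of enumerating from index 0.
--     """
--     n = len(charset)
--     lo = max(start_idx, 0)
--     # cap the window's upper end by n**length without computing huge powers
--     if n <= 1:
--         total = 1 if (n == 1 or length == 0) else 0
--     else:
--         total = 1
--         for _ in range(length):
--             total *= n
--             if total >= end_idx:
--                 break
--     hi = end_idx if end_idx <= total else total
--     if hi <= lo:
--         return
--     # only the last m positions vary for indices below hi; the rest is a constant prefix
--     m = 0
--     p = 1
--     while m < length and p < hi:
--         p *= n
--         m += 1
--     prefix = charset[:1] * (length - m)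
--     for idx in range(lo, hi):
--         chars = []
--         i = idx
--         for _ in range(m):
--             chars.append(charset[i % n])
--             i //= n
--         yield prefix + ''.join(reversed(chars))
-- ===== Notes on version B (the rewrite author's own statement) =====
-- stated objective: faster
-- what changed: Instead of enumerating every product combination from index 0 and counting, B decodes each index of the window [max(start_idx,0), min(end_idx, n**length)) directly as a mixed-radix number into its combination, so work is proportional to the window, not to end_idx.
-- outside the precondition, e.g. on generate_combinations('ab', -1, 0, 3): A raises ValueError, B returns ['']
import Mathlib
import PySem

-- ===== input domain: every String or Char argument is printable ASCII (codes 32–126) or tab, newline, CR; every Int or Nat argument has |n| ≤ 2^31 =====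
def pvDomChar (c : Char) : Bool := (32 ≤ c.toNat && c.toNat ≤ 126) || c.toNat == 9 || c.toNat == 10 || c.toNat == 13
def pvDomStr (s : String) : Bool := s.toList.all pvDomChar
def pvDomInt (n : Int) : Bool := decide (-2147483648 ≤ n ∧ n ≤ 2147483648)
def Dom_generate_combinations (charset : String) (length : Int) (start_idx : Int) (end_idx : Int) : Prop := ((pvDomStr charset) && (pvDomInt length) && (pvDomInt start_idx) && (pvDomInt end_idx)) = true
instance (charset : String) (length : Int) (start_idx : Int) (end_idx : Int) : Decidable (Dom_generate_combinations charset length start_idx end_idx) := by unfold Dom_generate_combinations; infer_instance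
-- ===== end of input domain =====

-- B replaces A's enumerate-and-count over the itertools.product stream by direct
-- mixed-radix decoding of only the indices in [max(start,0), min(end, n^length)) (objective: faster).


-- ===== PORT A =====
-- itertools.product(charset, repeat=length) is a LAZY iterator; A's loop consumes it and
-- breaks early.  The port transcribes product's iterator: the state is the tuple of current
-- positions into charset (odometer, rightmost position least significant); odoNext is
-- product's step — increment the rightmost position, carrying and resetting to 0, `none`
-- when the iterator is exhausted.  For length < 0 Python raises ValueError — excluded by Pre_.
def odoNext (N : Nat) : List Nat → Option (List Nat)
  | [] => none
  | d :: rest =>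
    match odoNext N rest with
    | some rest' => some (d :: rest')
    | none => if d + 1 < N then some ((d + 1) :: List.replicate rest.length 0) else none

-- A's for-loop: counter, yield when start_idx <= counter < end_idx, break when counter+1 >= end_idx,
-- stop when the product iterator is exhausted.  The fuel only makes the recursion structural:
-- the break fires after at most max(end_idx,1) iterations, so the fuel is never exhausted.
def loopA (cs : List Char) (N : Nat) (s e : Int) : Nat → List Nat → Int → List String
  | 0, _, _ => []
  | fuel + 1, idxs, counter =>
    (if s ≤ counter ∧ counter < e then [String.ofList (idxs.map (fun d => cs.getD d ' '))] else []) ++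
      (if e ≤ counter + 1 then [] else
        match odoNext N idxs with
        | none => []
        | some idxs' => loopA cs N s e fuel idxs' (counter + 1))

def generate_combinations (charset : String) (length : Int) (start_idx : Int) (end_idx : Int) : List String :=
  -- product over an empty pool with repeat >= 1 is the empty iterator (product's init check)
  if charset.toList.length = 0 ∧ length.toNat ≠ 0 then []
  else loopA charset.toList charset.toList.length start_idx end_idx
    (max end_idx 1).toNat (List.replicate length.toNat 0) 0

-- ===== PORT B =====
-- B's capping loop: total = 1; for _ in range(length): total *= n; break if total >= end_idx.
def capLoop (n e : Int) : Nat → Int → Int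
  | 0, total => total
  | k + 1, total => if e ≤ total * n then total * n else capLoop n e k (total * n)

-- B's `total` (the n <= 1 special cases, else the capping loop).
def bTotal (cs : List Char) (length : Int) (end_idx : Int) : Int :=
  if (cs.length : Int) ≤ 1 then (if (cs.length : Int) = 1 ∨ length = 0 then 1 else 0)
  else capLoop (cs.length : Int) end_idx length.toNat 1

-- B's inner decode loop, building the string back-to-front (Python appends then reverses;
-- here the accumulator is prepended to — the same reversed construction).  charset[i % n] is
-- exact via getD: whenever this loop runs in B, 1 <= n and 0 <= i % n < n, so the index is in range.
def decodeB (cs : List Char) (n : Int) : Nat → Int → List Char → List Char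
  | 0, _, acc => acc
  | k + 1, i, acc =>
      decodeB cs n k (PySem.Int.floordiv i n) (cs.getD (PySem.Int.mod i n).toNat ' ' :: acc)

-- B's `hi`: the window's upper end, end_idx capped by total.
def hiB (cs : List Char) (length : Int) (end_idx : Int) : Int :=
  if end_idx ≤ bTotal cs length end_idx then end_idx else bTotal cs length end_idx

-- B's `m` loop: m = 0; p = 1; while m < length and p < hi: p *= n; m += 1
-- (the number of rightmost positions that vary for indices below hi).
def mLoop (n hi : Int) : Nat → Int → Nat
  | 0, _ => 0
  | k + 1, p => if p < hi then mLoop n hi k (p * n) + 1 else 0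

def generate_combinations_alt (charset : String) (length : Int) (start_idx : Int) (end_idx : Int) : List String :=
  if hiB charset.toList length end_idx ≤ max start_idx 0 then []
  else
    -- prefix = charset[:1] * (length - m), then decode the last m positions of each index
    (PySem.List.pyRange (max start_idx 0) (hiB charset.toList length end_idx) 1).map
      (fun idx => String.ofList (
        (List.replicate (length.toNat - mLoop (charset.toList.length : Int) (hiB charset.toList length end_idx) length.toNat 1) (charset.toList.take 1)).flatten ++
        decodeB charset.toList (charset.toList.length : Int) (mLoop (charset.toList.length : Int) (hiB charset.toList length end_idx) length.toNat 1) idx []))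

-- ===== PRECONDITION & SPEC =====
-- A raises ValueError ("repeat argument cannot be negative") for length < 0; that is all Pre_ excludes.
def Pre_generate_combinations (charset : String) (length : Int) (start_idx : Int) (end_idx : Int) : Prop :=
  0 ≤ length
instance (charset : String) (length : Int) (start_idx : Int) (end_idx : Int) : Decidable (Pre_generate_combinations charset length start_idx end_idx) := by unfold Pre_generate_combinations; infer_instance

def pvWitness_generate_combinations : String × Int × Int × Int := ("ab", 2, 1, 3)

def Spec_generate_combinations (charset : String) (length : Int) (start_idx : Int) (end_idx : Int) (out : List String) : Prop := out = generate_combinations_alt charset length start_idx end_idx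
instance (charset : String) (length : Int) (start_idx : Int) (end_idx : Int) (out : List String) : Decidable (Spec_generate_combinations charset length start_idx end_idx out) := by unfold Spec_generate_combinations; infer_instance

-- ===== CLAIM (what is proved, stated in full; the proofs are below) =====
def Claim_equal_generate_combinations : Prop := ∀ (charset : String) (length : Int) (start_idx : Int) (end_idx : Int), Dom_generate_combinations charset length start_idx end_idx → Pre_generate_combinations charset length start_idx end_idx → Spec_generate_combinations charset length start_idx end_idx (generate_combinations charset length start_idx end_idx)

-- ===== LEMMAS AND PROOFS =====

-- the k digits of i base N, most significant first (value form of the odometer state)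
def digN (N : Nat) : Nat → Nat → List Nat
  | 0, _ => []
  | k + 1, i => digN N k (i / N) ++ [i % N]

-- the corresponding characters
def digitsL (cs : List Char) : Nat → Nat → List Char
  | 0, _ => []
  | k + 1, i => digitsL cs k (i / cs.length) ++ [cs.getD (i % cs.length) ' ']

lemma digitsL_eq_digN (cs : List Char) : ∀ (k i : Nat),
    (digN cs.length k i).map (fun d => cs.getD d ' ') = digitsL cs k i
  | 0, _ => rfl
  | k + 1, i => by
    rw [digN, digitsL, List.map_append, digitsL_eq_digN cs k]
    rfl

lemma digN_length (N : Nat) : ∀ (k i : Nat), (digN N k i).length = k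
  | 0, _ => rfl
  | k + 1, i => by simp [digN, digN_length N k]

lemma digN_zero (N : Nat) : ∀ (k : Nat), digN N k 0 = List.replicate k 0
  | 0 => rfl
  | k + 1 => by
    rw [digN, Nat.zero_div, Nat.zero_mod, digN_zero N k, List.replicate_succ']

lemma digN_msb (N : Nat) : ∀ (k c : Nat), c < N ^ (k + 1) →
    digN N (k + 1) c = (c / N ^ k) :: digN N k (c % N ^ k)
  | 0, c, h => by
    simp [digN, Nat.mod_eq_of_lt (by simpa using h)]
  | k + 1, c, h => by
    have hN : 0 < N := by
      rcases Nat.eq_zero_or_pos N with h0 | h0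
      · rw [h0] at h; simp at h
      · exact h0
    have h' : c / N < N ^ (k + 1) := Nat.div_lt_of_lt_mul (by rw [← pow_succ']; exact h)
    have e1 : c / N / N ^ k = c / N ^ (k + 1) := by
      rw [Nat.div_div_eq_div_mul, ← pow_succ']
    have e2 : c % N ^ (k + 1) / N = c / N % N ^ k := by
      rw [pow_succ', Nat.mod_mul_right_div_self]
    have e3 : c % N ^ (k + 1) % N = c % N :=
      Nat.mod_mod_of_dvd c (dvd_pow_self N (Nat.succ_ne_zero k))
    calc digN N (k + 1 + 1) c = digN N (k + 1) (c / N) ++ [c % N] := rfl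
      _ = ((c / N / N ^ k) :: digN N k (c / N % N ^ k)) ++ [c % N] := by
          rw [digN_msb N k (c / N) h']
      _ = (c / N ^ (k + 1)) :: (digN N k (c / N % N ^ k) ++ [c % N]) := by rw [e1]; rfl
      _ = (c / N ^ (k + 1)) :: digN N (k + 1) (c % N ^ (k + 1)) := by
          rw [show digN N (k + 1) (c % N ^ (k + 1))
              = digN N k (c % N ^ (k + 1) / N) ++ [c % N ^ (k + 1) % N] from rfl, e2, e3]

lemma odoNext_digN (N : Nat) : ∀ (k c : Nat), c < N ^ k →
    odoNext N (digN N k c) = if c + 1 < N ^ k then some (digN N k (c + 1)) else none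
  | 0, c, h => by
    have hc : c = 0 := by simpa using h
    simp [hc, digN, odoNext]
  | k + 1, c, h => by
    have hN : 0 < N := by
      rcases Nat.eq_zero_or_pos N with h0 | h0
      · rw [h0] at h; simp at h
      · exact h0
    have hNk : 0 < N ^ k := pow_pos hN k
    have hq : c / N ^ k < N := by
      rw [Nat.div_lt_iff_lt_mul hNk, Nat.mul_comm]
      rw [pow_succ] at h
      exact h
    have hr : c % N ^ k < N ^ k := Nat.mod_lt _ hNk
    have hc : N ^ k * (c / N ^ k) + c % N ^ k = c := Nat.div_add_mod c (N ^ k)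
    rw [digN_msb N k c h, odoNext, odoNext_digN N k (c % N ^ k) hr]
    by_cases h1 : c % N ^ k + 1 < N ^ k
    · -- no carry out of the lower digits
      have hlt : c + 1 < N ^ (k + 1) := by
        rw [pow_succ]; nlinarith
      have hd : (c + 1) / N ^ k = c / N ^ k ∧ (c + 1) % N ^ k = c % N ^ k + 1 := by
        constructor
        · rw [show c + 1 = N ^ k * (c / N ^ k) + (c % N ^ k + 1) by omega,
            Nat.mul_add_div hNk, Nat.div_eq_of_lt h1, Nat.add_zero]
        · rw [show c + 1 = N ^ k * (c / N ^ k) + (c % N ^ k + 1) by omega,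
            Nat.mul_add_mod, Nat.mod_eq_of_lt h1]
      rw [if_pos h1, if_pos hlt, digN_msb N k (c + 1) hlt, hd.1, hd.2]
    · -- carry: the lower digits are all maximal, reset them and bump this digit
      have h1' : c % N ^ k + 1 = N ^ k := by omega
      have hcc : c + 1 = N ^ k * (c / N ^ k + 1) := by
        rw [Nat.mul_add, Nat.mul_one]; omega
      rw [if_neg h1, digN_length]
      by_cases h2 : c / N ^ k + 1 < N
      · have hlt : c + 1 < N ^ (k + 1) := by
          rw [hcc, pow_succ]
          exact (Nat.mul_lt_mul_left hNk).mpr h2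
        have hd1 : (c + 1) / N ^ k = c / N ^ k + 1 := by
          rw [hcc, Nat.mul_div_cancel_left _ hNk]
        have hd2 : (c + 1) % N ^ k = 0 := by rw [hcc]; exact Nat.mul_mod_right _ _
        rw [if_pos h2, if_pos hlt, digN_msb N k (c + 1) hlt, hd1, hd2, digN_zero]
      · have h2' : c / N ^ k + 1 = N := by omega
        have hge : ¬ c + 1 < N ^ (k + 1) := by
          rw [hcc, h2', pow_succ, Nat.mul_comm]
          omega
        rw [if_neg h2, if_neg hge]

lemma decodeB_eq (cs : List Char) : ∀ (k : Nat) (i : Int), 0 ≤ i → ∀ acc,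
    decodeB cs (cs.length : Int) k i acc = digitsL cs k i.toNat ++ acc
  | 0, i, _, acc => by simp [decodeB, digitsL]
  | k + 1, i, hi, acc => by
    have hcast : i = ((i.toNat : Nat) : Int) := by omega
    rw [decodeB, hcast, PySem.Int.floordiv_natCast, PySem.Int.mod_natCast,
      decodeB_eq cs k _ (by positivity) _, Int.toNat_natCast, Int.toNat_natCast,
      Int.toNat_natCast]
    simp only [digitsL]
    simp

lemma mLoop_spec (n hi : Int) : ∀ (fuel : Nat) (p : Int),
    mLoop n hi fuel p ≤ fuel ∧ (hi ≤ p * n ^ (mLoop n hi fuel p) ∨ mLoop n hi fuel p = fuel)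
  | 0, p => ⟨le_refl 0, Or.inr rfl⟩
  | k + 1, p => by
    simp only [mLoop]
    split_ifs with h
    · obtain ⟨h1, h2⟩ := mLoop_spec n hi k (p * n)
      refine ⟨by omega, ?_⟩
      rcases h2 with h2 | h2
      · left
        rw [show p * n ^ (mLoop n hi k (p * n) + 1) = (p * n) * n ^ (mLoop n hi k (p * n)) by ring]
        exact h2
      · right; omega
    · exact ⟨by omega, Or.inl (by simpa using not_lt.mp h)⟩

lemma digN_pad (N : Nat) (hN : 0 < N) : ∀ (L m i : Nat), m ≤ L → i < N ^ m →
    digN N L i = List.replicate (L - m) 0 ++ digN N m i := by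
  intro L
  induction L with
  | zero => intro m i hm _; interval_cases m; simp
  | succ l ih =>
    intro m i hm hi
    rcases Nat.eq_or_lt_of_le hm with he | hl
    · rw [he]; simp
    · have hml : m ≤ l := by omega
      have him : i < N ^ (l + 1) :=
        lt_of_lt_of_le hi (Nat.pow_le_pow_right hN (by omega))
      have hil : i < N ^ l := lt_of_lt_of_le hi (Nat.pow_le_pow_right hN hml)
      rw [digN_msb N l i him, Nat.div_eq_of_lt hil, Nat.mod_eq_of_lt hil, ih m i hml hi,
        show l + 1 - m = (l - m) + 1 by omega, List.replicate_succ]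
      rfl

lemma digitsL_pad (cs : List Char) (hN : 0 < cs.length) (L m i : Nat) (hm : m ≤ L)
    (hi : i < cs.length ^ m) :
    digitsL cs L i = List.replicate (L - m) (cs.getD 0 ' ') ++ digitsL cs m i := by
  rw [← digitsL_eq_digN, ← digitsL_eq_digN, digN_pad cs.length hN L m i hm hi,
    List.map_append, List.map_replicate]

lemma flatten_replicate_singleton {α : Type} (k : Nat) (a : α) :
    (List.replicate k [a]).flatten = List.replicate k a := by
  induction k with
  | zero => rfl
  | succ k ih => simp [List.replicate_succ, ih]

lemma take_one_getD (cs : List Char) (hN : 0 < cs.length) :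
    cs.take 1 = [cs.getD 0 ' '] := by
  rcases cs with _ | ⟨c, t⟩
  · simp at hN
  · rfl

lemma capLoop_min (n e : Int) (hn : 2 ≤ n) : ∀ (k : Nat) (t : Int), 1 ≤ t →
    min e (capLoop n e k t) = min e (t * n ^ k)
  | 0, t, _ => by simp [capLoop]
  | k + 1, t, ht => by
    rw [capLoop]
    split_ifs with h
    · have h1 : (1 : Int) ≤ n ^ k := one_le_pow₀ (by omega)
      have h2 : t * n ≤ t * n ^ (k + 1) := by
        have h3 : (t * n) * 1 ≤ (t * n) * n ^ k :=
          mul_le_mul_of_nonneg_left h1 (by nlinarith)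
        calc t * n = (t * n) * 1 := by ring
          _ ≤ (t * n) * n ^ k := h3
          _ = t * n ^ (k + 1) := by ring
      omega
    · rw [capLoop_min n e hn k (t * n) (by nlinarith)]
      congr 1
      ring

lemma loopA_eq (cs : List Char) (s e : Int) : ∀ (fuel : Nat) (L : Nat) (c : Int) (cN : Nat),
    c = (cN : Int) → cN < cs.length ^ L →
    min e ((cs.length ^ L : Nat) : Int) - c ≤ (fuel : Int) → 1 ≤ fuel →
    loopA cs cs.length s e fuel (digN cs.length L cN) c
      = (PySem.List.pyRange (max s c) (min e ((cs.length ^ L : Nat) : Int)) 1).map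
          (fun i => String.ofList (digitsL cs L i.toNat))
  | 0, _, _, _, _, _, _, hf2 => by omega
  | fuel + 1, L, c, cN, hc, hcN, hf1, _ => by
    have hcT : c < ((cs.length ^ L : Nat) : Int) := by omega
    rw [loopA, digitsL_eq_digN, odoNext_digN cs.length L cN hcN]
    by_cases he : e ≤ c
    · rw [if_neg (by omega), if_pos (by omega),
        PySem.List.pyRange_one_eq_nil (by omega : min e ((cs.length ^ L : Nat) : Int) ≤ max s c)]
      simp
    · have hcn : c.toNat = cN := by omega
      by_cases heb : e ≤ c + 1
      · -- the break fires after this iteration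
        have hmin : min e ((cs.length ^ L : Nat) : Int) = c + 1 := by omega
        rw [if_pos heb, hmin]
        by_cases hsc : s ≤ c
        · have h0 : max s c = c := by omega
          rw [if_pos (show s ≤ c ∧ c < e by omega), h0, PySem.List.pyRange_one_singleton]
          simp [hcn]
        · rw [if_neg (show ¬(s ≤ c ∧ c < e) by omega), PySem.List.pyRange_one_eq_nil (by omega)]
          simp
      · rw [if_neg heb]
        by_cases hnx : cN + 1 < cs.length ^ L
        · rw [if_pos hnx]
          have ih := loopA_eq cs s e fuel L (c + 1) (cN + 1) (by omega) hnx
            (by omega) (by omega)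
          show (if s ≤ c ∧ c < e then [String.ofList (digitsL cs L cN)] else []) ++
              loopA cs cs.length s e fuel (digN cs.length L (cN + 1)) (c + 1) = _
          rw [ih]
          by_cases hsc : s ≤ c
          · rw [if_pos (show s ≤ c ∧ c < e by omega)]
            have h1 : max s (c + 1) = c + 1 := by omega
            have h2 : max s c = c := by omega
            rw [h1, h2,
              PySem.List.pyRange_one_cons (show c < min e ((cs.length ^ L : Nat) : Int) by omega),
              List.map_cons, hcn]
            rfl
          · rw [if_neg (by omega)]
            have h1 : max s (c + 1) = max s c := by omega
            rw [h1, List.nil_append]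
        · -- the iterator is exhausted: cN was the last combination
          have hT : ((cs.length ^ L : Nat) : Int) = c + 1 := by omega
          have hmin : min e ((cs.length ^ L : Nat) : Int) = c + 1 := by omega
          rw [if_neg hnx, hmin]
          by_cases hsc : s ≤ c
          · have h0 : max s c = c := by omega
            rw [if_pos (show s ≤ c ∧ c < e by omega), h0, PySem.List.pyRange_one_singleton]
            simp [hcn]
          · rw [if_neg (show ¬(s ≤ c ∧ c < e) by omega), PySem.List.pyRange_one_eq_nil (by omega)]
            simp

-- ===== VERDICT (by name: the statement is the Claim_ definition above) =====
theorem generate_combinations_spec : Claim_equal_generate_combinations := by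
  intro charset length s e _hdom hpre
  unfold Pre_generate_combinations at hpre
  unfold Spec_generate_combinations generate_combinations generate_combinations_alt
  set cs := charset.toList with hcs
  set N := cs.length with hNdef
  set L := length.toNat with hLdef
  have hif : (if e ≤ bTotal cs length e then e else bTotal cs length e)
      = min e (bTotal cs length e) := by split_ifs with h <;> omega
  have htot : min e (bTotal cs length e) = min e ((N : Int) ^ L) := by
    unfold bTotal
    rw [← hLdef]
    split_ifs with hle h1
    · have hpow : ((N : Int)) ^ L = 1 := by
        rcases h1 with h | h
        · have hN1 : N = 1 := by exact_mod_cast h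
          simp [hN1]
        · have hL0 : L = 0 := by omega
          simp [hL0]
      rw [hpow]
    · rw [not_or] at h1
      obtain ⟨h1a, h1b⟩ := h1
      have hN0 : N = 0 := by omega
      have hL0 : L ≠ 0 := by omega
      simp [hN0, zero_pow hL0]
    · have h2 : (2 : Int) ≤ (N : Int) := by omega
      rw [capLoop_min (N : Int) e h2 L 1 le_rfl, one_mul]
  have hTc : ((N : Int)) ^ L = ((N ^ L : Nat) : Int) := by push_cast; rfl
  have hhi : hiB cs length e = min e ((N ^ L : Nat) : Int) := by
    unfold hiB
    rw [hif, htot, hTc]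
  rw [hhi]
  by_cases hguard : N = 0 ∧ L ≠ 0
  · -- A's empty pool: B's window is empty too
    rw [if_pos hguard, if_pos (show min e ((N ^ L : Nat) : Int) ≤ max s 0 by
      rw [hguard.1, zero_pow hguard.2]; push_cast; omega)]
  · rw [if_neg hguard]
    have hNL : 0 < N ^ L := by
      rcases Nat.eq_zero_or_pos N with h | h
      · have hL0 : L = 0 := by tauto
        simp [hL0]
      · exact pow_pos h L
    rw [show (List.replicate L (0 : Nat)) = digN N L 0 from (digN_zero N L).symm]
    rw [loopA_eq cs s e (max e 1).toNat L 0 0 rfl hNL (by omega) (by omega)]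
    by_cases hg : min e ((N ^ L : Nat) : Int) ≤ max s 0
    · rw [if_pos hg, PySem.List.pyRange_one_eq_nil hg]
      rfl
    · rw [if_neg hg]
      apply List.map_congr_left
      intro i hi
      rw [PySem.List.mem_pyRange_one] at hi
      have h0i : 0 ≤ i := by omega
      set M := mLoop (N : Int) (min e ((N ^ L : Nat) : Int)) L 1 with hM
      obtain ⟨hmle, hmb⟩ := mLoop_spec (N : Int) (min e ((N ^ L : Nat) : Int)) L 1
      rw [← hM] at hmle hmb
      have hcast2 : ((N : Int)) ^ M = ((N ^ M : Nat) : Int) := by push_cast; rfl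
      have hhm : min e ((N ^ L : Nat) : Int) ≤ ((N ^ M : Nat) : Int) := by
        rcases hmb with hb | hb
        · rw [one_mul, hcast2] at hb
          exact hb
        · rw [hb]
          exact min_le_right _ _
      have hiMI : i < ((N ^ M : Nat) : Int) := lt_of_lt_of_le hi.2 hhm
      have hiM : i.toNat < N ^ M := by omega
      rw [decodeB_eq cs M i h0i]
      by_cases hN0 : N = 0
      · have hL0 : L = 0 := by tauto
        have hM0 : M = 0 := by omega
        simp [hL0, hM0, digitsL]
      · have hNpos : 0 < N := by omega
        rw [digitsL_pad cs hNpos L M i.toNat hmle hiM, take_one_getD cs hNpos,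
          flatten_replicate_singleton]
        simp
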